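-- pv_equiv track=rewrite | github.com/thompcd/Chinese-Postman | graph.py | remove_edges
-- ===== SOURCE A (Python) =====
-- def remove_edges(original_graph, edges):
--     """
--     Remove a list of edges from a graph.
--
--     Works even for reversed edge names, e.g. 'BA' will still match 'AB'.
--     Will not remove all edges, if parallel edges exist, unless they are
--     listed twice.
--
--     """
--     graph = original_graph[:]
--     for bad_edge in edges:
--         for edge in graph[:]:  # Iterate over a copy
--             if edge[0] in (bad_edge, bad_edge[::-1]):
--                 graph.remove(edge)
--                 break  # Do not remove same edge twice!
--     return graph
-- ===== SOURCE B (Python) =====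
-- def remove_edges(original_graph, edges):
--     """One pass: count bad edges by normalized name, then filter the graph,
--     decrementing a counter instead of rescanning per bad edge."""
--     counts = {}
--     for bad in edges:
--         k = min(bad, bad[::-1])
--         counts[k] = counts.get(k, 0) + 1
--     result = []
--     for edge in original_graph:
--         k = min(edge[0], edge[0][::-1])
--         c = counts.get(k, 0)
--         if c:
--             counts[k] = c - 1
--         else:
--             result.append(edge)
--     return result
-- ===== Notes on version B (the rewrite author's own statement) =====
-- stated objective: faster
-- what changed: Replaced the per-bad-edge rescan-and-remove over a mutating copy of the graph by a multiset counter of normalized (min of name and reversed name) bad-edge names built once, then a single filtering pass over the graph that decrements the counter on a match.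
import Mathlib
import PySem

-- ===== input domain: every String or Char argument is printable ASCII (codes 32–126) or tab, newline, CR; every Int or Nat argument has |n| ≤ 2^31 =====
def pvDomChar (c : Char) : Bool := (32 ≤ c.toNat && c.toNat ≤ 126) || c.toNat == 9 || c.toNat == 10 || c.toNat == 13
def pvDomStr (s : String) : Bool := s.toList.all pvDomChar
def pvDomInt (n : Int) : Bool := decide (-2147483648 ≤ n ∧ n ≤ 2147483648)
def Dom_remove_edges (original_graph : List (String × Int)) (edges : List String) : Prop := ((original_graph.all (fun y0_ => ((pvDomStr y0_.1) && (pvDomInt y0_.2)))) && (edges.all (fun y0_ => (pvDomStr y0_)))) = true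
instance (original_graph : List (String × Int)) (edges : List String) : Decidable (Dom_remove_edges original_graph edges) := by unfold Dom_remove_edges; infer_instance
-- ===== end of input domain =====

-- ===== PORT A =====
-- B is faster: it builds a counter of normalized bad-edge names once and filters the
-- graph in one pass, instead of A's rescan-and-remove per bad edge.
-- Shared helper: s[::-1] on a string (exact: PySem.Str.slice?_none_none_neg_one states
-- Str.slice? s none none (-1) = some (String.ofList s.toList.reverse)).
def pyRev (s : String) : String := String.ofList s.toList.reverse

-- inner loop of A: scan `rest` (the copy of graph); on the first match remove that
-- element from `graph` (list.remove = PySem.List.remove?, never raises here since the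
-- matched element is in graph) and break; if the scan ends, return graph unchanged
def goA (graph : List (String × Int)) (bad : String) : List (String × Int) → List (String × Int)
  | [] => graph
  | e :: rest =>
    if e.1 = bad ∨ e.1 = pyRev bad then (PySem.List.remove? graph e).getD graph
    else goA graph bad rest

def remove_edges (original_graph : List (String × Int)) (edges : List String) : List (String × Int) :=
  List.foldl (fun graph bad => goA graph bad graph) original_graph edges

-- ===== PORT B =====
-- second loop of Source B: filter graph, decrementing the counter on a match (Python `if c:` is c ≠ 0)
def goB (counts : PySem.Dict String Int) : List (String × Int) → List (String × Int)
  | [] => []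
  | e :: rest =>
    let k := min e.1 (pyRev e.1)
    let c := counts.getD k 0
    if c ≠ 0 then goB (counts.insert k (c - 1)) rest
    else e :: goB counts rest

def remove_edges_alt (original_graph : List (String × Int)) (edges : List String) : List (String × Int) :=
  let counts := List.foldl (fun d bad =>
    let k := min bad (pyRev bad)
    d.insert k (d.getD k 0 + 1)) PySem.Dict.empty edges
  goB counts original_graph

-- ===== PRECONDITION & SPEC =====
def Spec_remove_edges (original_graph : List (String × Int)) (edges : List String) (out : List (String × Int)) : Prop := out = remove_edges_alt original_graph edges
instance (original_graph : List (String × Int)) (edges : List String) (out : List (String × Int)) : Decidable (Spec_remove_edges original_graph edges out) := by unfold Spec_remove_edges; infer_instance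

-- ===== CLAIM (what is proved, stated in full; the proofs are below) =====
def Claim_equal_remove_edges : Prop := ∀ (original_graph : List (String × Int)) (edges : List String), Dom_remove_edges original_graph edges → Spec_remove_edges original_graph edges (remove_edges original_graph edges)

-- ===== LEMMAS AND PROOFS =====

-- normalized edge name: Python's min(s, s[::-1])
def keyOf (s : String) : String := min s (pyRev s)

-- erase the first edge whose normalized name is k (semantic form of A's inner loop)
def eraseM (k : String) : List (String × Int) → List (String × Int)
  | [] => []
  | e :: g => if keyOf e.1 = k then g else e :: eraseM k g

-- filter g against a multiset of normalized bad names (semantic form of B's pass)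
def F : List (String × Int) → List String → List (String × Int)
  | [], _ => []
  | e :: g, ks => if keyOf e.1 ∈ ks then F g (ks.erase (keyOf e.1)) else e :: F g ks

theorem pyRev_pyRev (s : String) : pyRev (pyRev s) = s := by
  simp [pyRev]

theorem key_iff (e b : String) : (e = b ∨ e = pyRev b) ↔ keyOf e = keyOf b := by
  constructor
  · rintro (rfl | rfl)
    · rfl
    · simp [keyOf, pyRev_pyRev, min_comm]
  · intro h
    rcases min_choice e (pyRev e) with he | he <;> rcases min_choice b (pyRev b) with hb | hb <;>
      rw [keyOf] at h <;> rw [he] at h <;> rw [keyOf] at h <;> rw [hb] at h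
    · exact Or.inl h
    · exact Or.inr h
    · exact Or.inr (by rw [← h, pyRev_pyRev])
    · exact Or.inl (by have := congrArg pyRev h; rwa [pyRev_pyRev, pyRev_pyRev] at this)

theorem eraseM_of_no_match (k : String) (l : List (String × Int))
    (h : ∀ x ∈ l, keyOf x.1 ≠ k) : eraseM k l = l := by
  induction l with
  | nil => rfl
  | cons e g ih =>
    rw [eraseM, if_neg (h e (by simp)), ih (fun x hx => h x (by simp [hx]))]

theorem eraseM_match (k : String) (pre rest : List (String × Int)) (e : String × Int)
    (hpre : ∀ x ∈ pre, keyOf x.1 ≠ k) (he : keyOf e.1 = k) :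
    eraseM k (pre ++ e :: rest) = pre ++ rest := by
  induction pre with
  | nil => simp [eraseM, he]
  | cons p pre ih =>
    simp only [List.cons_append, eraseM, if_neg (hpre p (by simp))]
    rw [ih (fun x hx => hpre x (by simp [hx]))]

theorem remove?_prefix (pre rest : List (String × Int)) (e : String × Int)
    (hpre : ∀ x ∈ pre, x ≠ e) :
    PySem.List.remove? (pre ++ e :: rest) e = some (pre ++ rest) := by
  induction pre with
  | nil => simp
  | cons p pre ih =>
    rw [List.cons_append, PySem.List.remove?_cons_of_ne _ (hpre p (by simp)),
      ih (fun x hx => hpre x (by simp [hx]))]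
    rfl

theorem goA_eq_eraseM (bad : String) (pre rest : List (String × Int))
    (hpre : ∀ x ∈ pre, ¬(x.1 = bad ∨ x.1 = pyRev bad)) :
    goA (pre ++ rest) bad rest = eraseM (keyOf bad) (pre ++ rest) := by
  induction rest generalizing pre with
  | nil =>
    rw [goA, List.append_nil,
      eraseM_of_no_match _ _ (fun x hx => fun hk => hpre x hx ((key_iff x.1 bad).2 hk))]
  | cons e rest ih =>
    by_cases hm : e.1 = bad ∨ e.1 = pyRev bad
    · rw [goA, if_pos hm,
        remove?_prefix pre rest e (fun x hx => fun hxe => hpre x hx (hxe ▸ hm)),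
        Option.getD_some,
        eraseM_match (keyOf bad) pre rest e
          (fun x hx => fun hk => hpre x hx ((key_iff x.1 bad).2 hk))
          ((key_iff e.1 bad).1 hm)]
    · rw [goA, if_neg hm]
      have h2 : ∀ x ∈ pre ++ [e], ¬(x.1 = bad ∨ x.1 = pyRev bad) := by
        intro x hx
        rcases List.mem_append.1 hx with h | h
        · exact hpre x h
        · simp at h; subst h; exact hm
      have := ih (pre ++ [e]) h2
      rwa [List.append_assoc, List.singleton_append] at this

theorem F_nil_right (g : List (String × Int)) : F g [] = g := by
  induction g with
  | nil => rfl
  | cons e g ih => simp [F, ih]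

theorem F_cons_right (g : List (String × Int)) (k : String) (ks : List String) :
    F g (k :: ks) = F (eraseM k g) ks := by
  induction g generalizing ks with
  | nil => rfl
  | cons e g ih =>
    by_cases hk : keyOf e.1 = k
    · rw [F, if_pos (by simp [hk]), hk, List.erase_cons_head, eraseM, if_pos hk]
    · rw [eraseM, if_neg hk, F]
      have herase : (k :: ks).erase (keyOf e.1) = k :: ks.erase (keyOf e.1) :=
        List.erase_cons_tail (by simp; exact fun h => hk h.symm)
      by_cases hmem : keyOf e.1 ∈ ks
      · rw [if_pos (by simp [hmem]), herase, ih, F, if_pos hmem]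
      · rw [if_neg (by simp [hmem]; exact fun h => hk h), F, if_neg hmem, ih]

theorem foldl_eraseM (ks : List String) (g : List (String × Int)) :
    List.foldl (fun g k => eraseM k g) g ks = F g ks := by
  induction ks generalizing g with
  | nil => exact (F_nil_right g).symm
  | cons k ks ih => rw [List.foldl_cons, ih, F_cons_right]

-- the counter dict represents the multiset ks of normalized bad names
def CountInv (d : PySem.Dict String Int) (ks : List String) : Prop :=
  ∀ k, d.getD k 0 = (ks.count k : Int)

theorem countInv_empty : CountInv PySem.Dict.empty [] := by
  intro k
  simp [PySem.Dict.getD, PySem.Dict.get?, PySem.Dict.empty]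

theorem countInv_build (edges : List String) (d : PySem.Dict String Int) (ks : List String)
    (h : CountInv d ks) :
    CountInv (List.foldl (fun d bad =>
        let k := min bad (pyRev bad)
        d.insert k (d.getD k 0 + 1)) d edges) (ks ++ edges.map keyOf) := by
  induction edges generalizing d ks with
  | nil => simpa using h
  | cons b edges ih =>
    rw [List.foldl_cons]
    have hstep : CountInv (d.insert (min b (pyRev b)) (d.getD (min b (pyRev b)) 0 + 1))
        (ks ++ [keyOf b]) := by
      intro k
      have hkey : min b (pyRev b) = keyOf b := rfl
      rw [hkey]
      by_cases hk : k = keyOf b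
      · subst hk
        rw [PySem.Dict.getD_insert_self, h]
        simp
      · rw [PySem.Dict.getD_insert_of_ne _ _ _ hk, h]
        simp [Ne.symm hk]
    have := ih _ _ hstep
    simpa [List.append_assoc] using this

theorem goB_eq_F (g : List (String × Int)) (d : PySem.Dict String Int) (ks : List String)
    (h : CountInv d ks) : goB d g = F g ks := by
  induction g generalizing d ks with
  | nil => rfl
  | cons e g ih =>
    have hc := h (keyOf e.1)
    by_cases hmem : keyOf e.1 ∈ ks
    · have hpos : 0 < ks.count (keyOf e.1) := List.count_pos_iff.2 hmem
      rw [goB]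
      simp only [show min e.1 (pyRev e.1) = keyOf e.1 from rfl]
      rw [if_pos (by rw [hc]; exact_mod_cast hpos.ne')]
      rw [F, if_pos hmem]
      apply ih
      intro k
      by_cases hk : k = keyOf e.1
      · subst hk
        rw [PySem.Dict.getD_insert_self, hc, List.count_erase_self]
        omega
      · rw [PySem.Dict.getD_insert_of_ne _ _ _ hk, h, List.count_erase_of_ne (by exact hk)]
    · have hz : ks.count (keyOf e.1) = 0 := List.count_eq_zero.2 hmem
      rw [goB]
      simp only [show min e.1 (pyRev e.1) = keyOf e.1 from rfl]
      rw [if_neg (by rw [hc, hz]; simp), F, if_neg hmem, ih d ks h]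

theorem main_eq (g : List (String × Int)) (edges : List String) :
    remove_edges g edges = remove_edges_alt g edges := by
  rw [remove_edges, remove_edges_alt]
  have hA : List.foldl (fun graph bad => goA graph bad graph) g edges
      = List.foldl (fun graph bad => eraseM (keyOf bad) graph) g edges := by
    apply PySem.List.foldl_congr_mem
    intro graph bad _
    exact goA_eq_eraseM bad [] graph (by simp)
  rw [hA,
    show List.foldl (fun graph bad => eraseM (keyOf bad) graph) g edges
        = List.foldl (fun g k => eraseM k g) g (edges.map keyOf) from by rw [List.foldl_map],
    foldl_eraseM]
  exact (goB_eq_F g _ (edges.map keyOf) (by simpa using countInv_build edges _ [] countInv_empty)).symm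

-- ===== VERDICT (by name: the statement is the Claim_ definition above) =====
theorem remove_edges_spec : Claim_equal_remove_edges := by
  intro g edges _
  unfold Spec_remove_edges
  exact main_eq g edges
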